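-- pv_equiv track=rewrite | github.com/Matias222/Beating-the-market | scrap.py | extraer_llave
-- ===== SOURCE A (Python) =====
-- def extraer_llave(cadena):
--
--     bloqueo=0
--     temp=""
--
--     for i in range(len(cadena)-1,-1,-1):
--
--         if(bloqueo==1):
--             if(cadena[i]=="/"): return "".join(reversed(temp))
--             else: temp+=cadena[i]
--             bloqueo=1
--         elif(cadena[i]=="-"): bloqueo=1
-- ===== SOURCE B (Python) =====
-- def extraer_llave(cadena):
--     d = cadena.rfind("-")
--     if d == -1:
--         return None
--     s = cadena.rfind("/", 0, d)
--     if s == -1: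
--         return None
--     return cadena[s+1:d]
-- ===== Notes on version B (the rewrite author's own statement) =====
-- stated objective: idiomatic
-- what changed: Replaces the manual backward character loop with its bloqueo/temp state machine and reversed-string accumulation by two rfind library searches and a single slice.
import Mathlib
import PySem

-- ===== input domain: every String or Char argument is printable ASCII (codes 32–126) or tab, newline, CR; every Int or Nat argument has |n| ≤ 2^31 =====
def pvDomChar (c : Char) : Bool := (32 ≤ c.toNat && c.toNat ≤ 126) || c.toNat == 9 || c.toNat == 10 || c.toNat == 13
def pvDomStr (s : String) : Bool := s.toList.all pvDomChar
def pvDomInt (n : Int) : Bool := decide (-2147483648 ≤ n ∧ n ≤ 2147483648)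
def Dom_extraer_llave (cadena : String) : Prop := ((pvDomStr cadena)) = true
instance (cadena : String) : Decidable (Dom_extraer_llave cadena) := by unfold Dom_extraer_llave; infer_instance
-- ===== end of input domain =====

-- B replaces A's manual backward character loop (bloqueo/temp state machine with
-- reversed accumulation) by two rfind library searches and a single slice; objective: idiomatic.

-- ===== PORT A =====
-- the for-loop over range(len(cadena)-1, -1, -1), with state (bloqueo, temp) and early return
def pvAloop (cs : List Char) : List Int → Int → List Char → Option String
  | [], _bloqueo, _temp => none
  | i :: rest, bloqueo, temp =>
    match PySem.List.pyGet? cs i with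
    | none => none   -- cadena[i] would raise IndexError; unreachable: every generated i is in range
    | some c =>
      if bloqueo = 1 then
        if c = '/' then some (String.ofList temp.reverse)   -- "".join(reversed(temp))
        else pvAloop cs rest 1 (temp ++ [c])
      else if c = '-' then pvAloop cs rest 1 temp
      else pvAloop cs rest bloqueo temp

def extraer_llave (cadena : String) : Option String :=
  pvAloop cadena.toList (PySem.List.pyRange (PySem.Str.len cadena - 1) (-1) (-1)) 0 []

-- ===== PORT B =====
def extraer_llave_alt (cadena : String) : Option String :=
  let d := PySem.Str.rfind cadena "-"
  if d = -1 then none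
  else
    let s := PySem.Str.rfindFrom cadena "/" 0 (some d)
    if s = -1 then none
    else some (PySem.Str.slice cadena (some (s + 1)) (some d))

-- ===== PRECONDITION & SPEC =====
def Spec_extraer_llave (cadena : String) (out : Option String) : Prop := out = extraer_llave_alt cadena
instance (cadena : String) (out : Option String) : Decidable (Spec_extraer_llave cadena out) := by unfold Spec_extraer_llave; infer_instance

-- ===== CLAIM (what is proved, stated in full; the proofs are below) =====
def Claim_equal_extraer_llave : Prop := ∀ (cadena : String), Dom_extraer_llave cadena → Spec_extraer_llave cadena (extraer_llave cadena)

-- ===== LEMMAS AND PROOFS =====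

-- the descending index list [k-1, …, 1, 0]
def pvIdxs (k : Nat) : List Int := ((List.range k).map (fun (j : Nat) => (j : Int))).reverse

-- last index j < k with cs[j] = x
def pvLast? (cs : List Char) (x : Char) : Nat → Option Nat
  | 0 => none
  | k+1 => if cs[k]? = some x then some k else pvLast? cs x k

theorem pvIdxs_succ (k : Nat) : pvIdxs (k+1) = (k : Int) :: pvIdxs k := by
  simp [pvIdxs, List.range_succ]

theorem pvLast?_lt {cs : List Char} {x : Char} {k s : Nat}
    (h : pvLast? cs x k = some s) : s < k := by
  induction k with
  | zero => simp [pvLast?] at h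
  | succ k ih =>
    by_cases hx : cs[k]? = some x
    · simp [pvLast?, hx] at h; omega
    · simp [pvLast?, hx] at h; exact Nat.lt_succ_of_lt (ih h)

theorem pvAloop_one (cs : List Char) (k : Nat) (hk : k ≤ cs.length) (temp : List Char) :
    pvAloop cs (pvIdxs k) 1 temp =
      match pvLast? cs '/' k with
      | none => none
      | some s => some (String.ofList ((cs.take k).drop (s+1) ++ temp.reverse)) := by
  induction k generalizing temp with
  | zero => simp [pvIdxs, pvAloop, pvLast?]
  | succ k ih =>
    have hk' : k < cs.length := by omega
    obtain ⟨c, hc⟩ : ∃ c, cs[k]? = some c := ⟨cs[k], List.getElem?_eq_getElem hk'⟩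
    rw [pvIdxs_succ]
    have hget : PySem.List.pyGet? cs ((k : Nat) : Int) = cs[k]? := by
      simp [PySem.List.pyGet?_natCast]
    by_cases hsl : c = '/'
    · subst hsl
      simp only [pvAloop, hget, hc, pvLast?]
      have : (cs.take (k+1)).drop (k+1) = [] := by
        apply List.drop_eq_nil_of_le; simp
      simp [this]
    · have hrec : pvAloop cs ((k : Int) :: pvIdxs k) 1 temp
          = pvAloop cs (pvIdxs k) 1 (temp ++ [c]) := by
        simp [pvAloop, hget, hc, hsl]
      rw [hrec, ih (by omega)]
      have hne : cs[k]? ≠ some '/' := by rw [hc]; simp [hsl]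
      rw [show pvLast? cs '/' (k+1) = pvLast? cs '/' k by simp [pvLast?, hne]]
      cases hlast : pvLast? cs '/' k with
      | none => rfl
      | some s =>
        have hs : s < k := pvLast?_lt hlast
        have htake : cs.take (k+1) = cs.take k ++ [c] := by
          rw [List.take_succ]; simp [hc]
        have hdrop : (cs.take (k+1)).drop (s+1) = (cs.take k).drop (s+1) ++ [c] := by
          rw [htake, List.drop_append_of_le_length]
          simp; omega
        simp [hdrop]

theorem pvAloop_zero (cs : List Char) (k : Nat) (hk : k ≤ cs.length) :
    pvAloop cs (pvIdxs k) 0 [] =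
      match pvLast? cs '-' k with
      | none => none
      | some d =>
        match pvLast? cs '/' d with
        | none => none
        | some s => some (String.ofList ((cs.take d).drop (s+1))) := by
  induction k with
  | zero => simp [pvIdxs, pvAloop, pvLast?]
  | succ k ih =>
    have hk' : k < cs.length := by omega
    obtain ⟨c, hc⟩ : ∃ c, cs[k]? = some c := ⟨cs[k], List.getElem?_eq_getElem hk'⟩
    rw [pvIdxs_succ]
    have hget : PySem.List.pyGet? cs ((k : Nat) : Int) = cs[k]? := by
      simp [PySem.List.pyGet?_natCast]
    by_cases hd : c = '-'
    · subst hd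
      have hstep : pvAloop cs ((k : Int) :: pvIdxs k) 0 []
          = pvAloop cs (pvIdxs k) 1 [] := by
        simp [pvAloop, hget, hc]
      rw [hstep, pvAloop_one cs k (by omega) []]
      rw [show pvLast? cs '-' (k+1) = some k by simp [pvLast?, hc]]
      cases hl : pvLast? cs '/' k <;> simp [hl]
    · have hstep : pvAloop cs ((k : Int) :: pvIdxs k) 0 []
          = pvAloop cs (pvIdxs k) 0 [] := by
        simp [pvAloop, hget, hc, hd]
      rw [hstep, ih (by omega)]
      have hne : cs[k]? ≠ some '-' := by rw [hc]; simp [hd]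
      rw [show pvLast? cs '-' (k+1) = pvLast? cs '-' k by simp [pvLast?, hne]]

-- a single-character pattern is a prefix iff it is the first element
theorem pvSingle_prefix (x : Char) (l : List Char) :
    List.isPrefixOf [x] l = (l[0]? == some x) := by
  cases l with
  | nil => simp [List.isPrefixOf]
  | cons c t => simp [List.isPrefixOf, BEq.comm]

-- rfind.go with a single-character pattern is the last index ≤ k holding that character
theorem pvRfind_go (cs : List Char) (x : Char) (k : Nat) :
    PySem.Chars.rfind.go cs [x] k =
      match pvLast? cs x (k+1) with
      | none => -1
      | some j => (j : Int) := by
  induction k with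
  | zero =>
    rw [PySem.Chars.rfind.go]
    rw [show pvLast? cs x 1 = if cs[0]? = some x then some 0 else none from rfl]
    by_cases h : cs[0]? = some x
    · simp [pvSingle_prefix, h]
    · simp [pvSingle_prefix, h]
  | succ k ih =>
    rw [PySem.Chars.rfind.go]
    have hdrop : (cs.drop (k+1))[0]? = cs[k+1]? := by
      rw [List.getElem?_drop]
    rw [show pvLast? cs x (k+1+1)
        = if cs[k+1]? = some x then some (k+1) else pvLast? cs x (k+1) from rfl]
    by_cases h : cs[k+1]? = some x
    · simp [pvSingle_prefix, hdrop, h]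
    · rw [ih]
      have hb : (cs[k + 1]? == some x) = false := by simp [h]
      simp [pvSingle_prefix, hdrop, hb, h]

theorem pvLast?_stable {cs : List Char} {x : Char} {k : Nat}
    (h : cs[k]? ≠ some x) : pvLast? cs x (k+1) = pvLast? cs x k := by
  simp [pvLast?, h]

-- rfind for a single character = last index in the whole string
theorem pvRfind_single (cs : List Char) (x : Char) :
    PySem.Chars.rfind cs [x] =
      match pvLast? cs x cs.length with
      | none => -1
      | some j => (j : Int) := by
  show PySem.Chars.rfind.go cs [x] cs.length = _
  rw [pvRfind_go]
  rw [pvLast?_stable (by simp)]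

-- pvLast? only inspects indices < k, so a truncation beyond k does not matter
theorem pvLast?_take (cs : List Char) (x : Char) (d k : Nat) (h : k ≤ d) :
    pvLast? (cs.take d) x k = pvLast? cs x k := by
  induction k with
  | zero => rfl
  | succ k ih =>
    have hk : (cs.take d)[k]? = cs[k]? := List.getElem?_take_of_lt (by omega)
    simp [pvLast?, hk, ih (by omega)]

theorem pvRfindFrom_single (cs : List Char) (x : Char) (d : Nat) (hd : d ≤ cs.length) :
    PySem.Chars.rfindFrom cs [x] 0 (some (d : Int)) =
      match pvLast? cs x d with
      | none => -1
      | some j => (j : Int) := by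
  have hlt : ¬ ((cs.length : Int) < (d : Int)) := by exact_mod_cast not_lt.mpr (by exact_mod_cast hd)
  have hneg : ¬ ((d : Int) < 0) := by omega
  show (if (if (cs.length : Int) < (d : Int) then (cs.length : Int)
            else if (d : Int) < 0 then (if (d:Int) + cs.length < 0 then 0 else (d:Int) + cs.length) else (d : Int)) <
          (if (0:Int) < 0 then _ else (0:Int)) then (-1 : Int)
        else _) = _
  rw [if_neg hlt, if_neg hneg]
  simp only [lt_irrefl, if_false]
  rw [if_neg (by omega)]
  have htoNat : ((d : Int)).toNat = d := Int.toNat_natCast d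
  have hlen : (cs.take d).length = d := by simp [hd]
  have : PySem.Chars.rfind (List.drop (0:Int).toNat (List.take ((d:Int)).toNat cs)) [x]
      = match pvLast? cs x d with | none => -1 | some j => (j : Int) := by
    rw [htoNat]
    simp only [Int.toNat_zero, List.drop_zero]
    rw [pvRfind_single, hlen, pvLast?_take cs x d d le_rfl]
  simp only [if_neg hlt, if_neg hneg]
  rw [this]
  cases hl : pvLast? cs x d with
  | none => simp
  | some j =>
    have hj : (j : Int) ≠ -1 := by omega
    simp [hj]

theorem pvRange_down (n : Nat) : PySem.List.pyRange ((n : Int) - 1) (-1) (-1) = pvIdxs n := by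
  unfold PySem.List.pyRange
  rw [if_neg (by norm_num)]
  rcases Nat.eq_zero_or_pos n with h0 | hpos
  · subst h0
    norm_num [pvIdxs]
  · have hlt : (-1 : Int) < (n : Int) - 1 := by
      have : (1 : Int) ≤ (n : Int) := by exact_mod_cast hpos
      omega
    rw [if_neg (by norm_num), if_pos hlt]
    have hcount : ((((n : Int) - 1) - (-1) + -(-1) - 1) / -(-1)).toNat = n := by
      norm_num
    rw [hcount]
    unfold pvIdxs
    apply List.ext_getElem
    · simp
    · intro i h1 h2
      have hi : i < n := by simpa using h1
      simp only [List.getElem_reverse, List.getElem_map, List.getElem_range, List.length_map, List.length_range]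
      omega

theorem extraer_llave_eq (cadena : String) :
    extraer_llave cadena = extraer_llave_alt cadena := by
  unfold extraer_llave extraer_llave_alt
  simp only [PySem.Str.rfind, PySem.Str.rfindFrom, PySem.Str.len]
  set cs := cadena.toList with hcs
  rw [pvRange_down cs.length, pvAloop_zero cs cs.length le_rfl]
  rw [show ("-" : String).toList = ['-'] from rfl, show ("/" : String).toList = ['/'] from rfl]
  rw [pvRfind_single cs '-']
  cases hd : pvLast? cs '-' cs.length with
  | none => simp
  | some d =>
    have hdlt : d < cs.length := pvLast?_lt hd
    have hne : ((d : Int)) ≠ -1 := by omega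
    simp only [hne]
    rw [pvRfindFrom_single cs '/' d (le_of_lt hdlt)]
    cases hs : pvLast? cs '/' d with
    | none => simp
    | some s =>
      have hslt : s < d := pvLast?_lt hs
      have hsne : ((s : Int)) ≠ -1 := by omega
      simp only [if_neg hsne]
      congr 1
      unfold PySem.Str.slice
      have hcast : ((s : Int) + 1) = ((s + 1 : Nat) : Int) := by push_cast; ring
      rw [hcast]
      rw [show PySem.Chars.slice cadena.toList (some ((s+1 : Nat) : Int)) (some ((d : Nat) : Int))
            = PySem.List.slice cadena.toList (some ((s+1 : Nat) : Int)) (some ((d : Nat) : Int)) from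
          PySem.Chars.slice_eq_listSlice _ _ _]
      rw [PySem.List.slice_natCast]
      rw [← hcs, ← List.drop_take]

-- ===== VERDICT (by name: the statement is the Claim_ definition above) =====
theorem extraer_llave_spec : Claim_equal_extraer_llave := by
  intro cadena _
  unfold Spec_extraer_llave
  exact extraer_llave_eq cadena
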